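-- pv_equiv track=rewrite | github.com/alphaGithub/sudoku | sudoku_solve.py | placeat
-- ===== SOURCE A (Python) =====
-- def checkRule(mat,pos,t):
-- 	i,j=pos
-- 	for m in range(0,9):
-- 		if mat[m][j] == t:
-- 			return False
-- 	for n in range(0,9):
-- 		if mat[i][n] == t:
-- 			return False
--
-- 	p=i//3
-- 	q=j//3
-- 	for m in range(0,3):
-- 		for n in range(0,3):
-- 			if(mat[(p*3)+m][(q*3)+n] == t):
-- 				return False
-- 	return True
--
-- def placeat(mat,pos):
-- 	i,j=pos
-- 	k=mat[i][j]
-- 	t=k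
-- 	while t<10:
-- 		if checkRule(mat,pos,t):
-- 			mat[i][j]=t
-- 			return True
-- 		else:
-- 			t=t+1
-- 	return False
-- ===== SOURCE B (Python) =====
-- def placeat(mat, pos):
--     i, j = pos
--     k = mat[i][j]
--     if k >= 10:
--         # cell values are single digits; a cell already at 10+ has no candidate
--         return False
--     used = set()
--     for n in range(9):
--         used.add(mat[i][n])
--     for m in range(9):
--         used.add(mat[m][j])
--     p = i // 3 * 3
--     q = j // 3 * 3
--     for m in range(3):
--         for n in range(3):
--             used.add(mat[p + m][q + n])
--     for t in range(k, 10):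
--         if t not in used:
--             mat[i][j] = t
--             return True
--     return False
-- ===== Notes on version B (the rewrite author's own statement) =====
-- stated objective: simpler
-- what changed: B builds one 'used' set of the row, column and box values up front and then makes a single scan over candidates k..9, instead of re-scanning the whole row/column/box via checkRule for every candidate.
-- outside the precondition, e.g. on placeat([[9]], (0, 0)): A returns False, B raises IndexError
import Mathlib
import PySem

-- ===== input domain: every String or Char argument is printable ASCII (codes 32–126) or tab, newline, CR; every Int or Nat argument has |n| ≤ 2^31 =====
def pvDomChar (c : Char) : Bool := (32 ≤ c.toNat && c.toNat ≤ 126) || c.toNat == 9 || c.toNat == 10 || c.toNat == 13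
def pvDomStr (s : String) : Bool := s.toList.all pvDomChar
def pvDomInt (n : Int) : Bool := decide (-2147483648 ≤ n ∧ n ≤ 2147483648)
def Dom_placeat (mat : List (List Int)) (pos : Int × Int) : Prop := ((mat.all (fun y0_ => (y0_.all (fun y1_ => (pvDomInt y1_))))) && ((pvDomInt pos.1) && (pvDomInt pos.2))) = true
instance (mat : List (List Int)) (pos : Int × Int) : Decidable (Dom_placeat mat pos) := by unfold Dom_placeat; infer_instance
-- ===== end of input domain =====

-- B replaces the per-candidate checkRule rescans with one `used` set of the row/column/box
-- values built up front, then a single scan over the candidates (objective: simpler).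
-- Both Pythons mutate mat[i][j] on success identically; the equivalence proved here is
-- about the RETURN value only.

-- ===== PORT A =====
-- mat[m][n]; under Pre_ every access is in range, so the default is never used
def pvGet2 (mat : List (List Int)) (m n : Int) : Int :=
  PySem.List.pyGetD (PySem.List.pyGetD mat m []) n 0

def checkRule (mat : List (List Int)) (pos : Int × Int) (t : Int) : Bool :=
  let i := pos.1
  let j := pos.2
  if (PySem.List.pyRange 0 9 1).any (fun m => pvGet2 mat m j == t) then false
  else if (PySem.List.pyRange 0 9 1).any (fun n => pvGet2 mat i n == t) then false
  else
    let p := PySem.Int.floordiv i 3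
    let q := PySem.Int.floordiv j 3
    if (PySem.List.pyRange 0 3 1).any (fun m =>
         (PySem.List.pyRange 0 3 1).any (fun n =>
           pvGet2 mat (p * 3 + m) (q * 3 + n) == t)) then false
    else true

-- the `while t < 10` loop of A
def placeLoopA (mat : List (List Int)) (pos : Int × Int) (t : Int) : Bool :=
  if t < 10 then
    if checkRule mat pos t then true else placeLoopA mat pos (t + 1)
  else false
termination_by (10 - t).toNat
decreasing_by omega

def placeat (mat : List (List Int)) (pos : Int × Int) : Bool :=
  placeLoopA mat pos (pvGet2 mat pos.1 pos.2)

-- ===== PORT B =====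
-- mat[m][n] on B's side (same convention: in range under Pre_, default unused)
def pvGet2B (mat : List (List Int)) (m n : Int) : Int :=
  PySem.List.pyGetD (PySem.List.pyGetD mat m []) n 0

-- the `used` set B builds: row i, column j, then the 3×3 box
def usedSet (mat : List (List Int)) (pos : Int × Int) : PySem.Set Int :=
  let i := pos.1
  let j := pos.2
  let p := PySem.Int.floordiv i 3 * 3
  let q := PySem.Int.floordiv j 3 * 3
  PySem.Set.ofList
    ((PySem.List.pyRange 0 9 1).map (fun n => pvGet2B mat i n)
      ++ (PySem.List.pyRange 0 9 1).map (fun m => pvGet2B mat m j)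
      ++ (PySem.List.pyRange 0 3 1).flatMap (fun m =>
            (PySem.List.pyRange 0 3 1).map (fun n => pvGet2B mat (p + m) (q + n))))

def placeat_alt (mat : List (List Int)) (pos : Int × Int) : Bool :=
  let k := pvGet2B mat pos.1 pos.2
  -- cell values are single digits; a cell already at 10+ has no candidate
  if 10 ≤ k then false
  else
    let used := usedSet mat pos
    (PySem.List.pyRange k 10 1).any (fun t => !(PySem.Set.contains used t))

-- ===== PRECONDITION & SPEC =====
-- Pre_ admits any grid whose addressed cell exists and already holds a value ≥ 10 (no
-- candidate range; A returns False without scanning) and any proper 9×9 grid with the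
-- cell index in range. It excludes grids/indices on which A raises IndexError, and the
-- accidental corner where a malformed (non-9×9) grid with a cell value < 10 still lets
-- every one of A's rescans match before reaching a missing cell, so A returns while a
-- full row/column/box scan raises.
def Pre_placeat (mat : List (List Int)) (pos : Int × Int) : Prop :=
  PySem.Raise.InRange mat.length pos.1 ∧
  PySem.Raise.InRange (PySem.List.pyGetD mat pos.1 []).length pos.2 ∧
  (10 ≤ PySem.List.pyGetD (PySem.List.pyGetD mat pos.1 []) pos.2 0 ∨
    (mat.length = 9 ∧ (∀ r ∈ mat, r.length = 9) ∧
      -9 ≤ pos.1 ∧ pos.1 < 9 ∧ -9 ≤ pos.2 ∧ pos.2 < 9))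
instance (mat : List (List Int)) (pos : Int × Int) : Decidable (Pre_placeat mat pos) := by
  unfold Pre_placeat; infer_instance

def pvWitness_placeat : List (List Int) × (Int × Int) :=
  ([[5,3,0,0,7,0,0,0,0],[6,0,0,1,9,5,0,0,0],[0,9,8,0,0,0,0,6,0],
    [8,0,0,0,6,0,0,0,3],[4,0,0,8,0,3,0,0,1],[7,0,0,0,2,0,0,0,6],
    [0,6,0,0,0,0,2,8,0],[0,0,0,4,1,9,0,0,5],[0,0,0,0,8,0,0,7,9]], (0, 2))

def Spec_placeat (mat : List (List Int)) (pos : Int × Int) (out : Bool) : Prop := out = placeat_alt mat pos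
instance (mat : List (List Int)) (pos : Int × Int) (out : Bool) : Decidable (Spec_placeat mat pos out) := by unfold Spec_placeat; infer_instance

-- ===== CLAIM (what is proved, stated in full; the proofs are below) =====
def Claim_equal_placeat : Prop := ∀ (mat : List (List Int)) (pos : Int × Int), Dom_placeat mat pos → Pre_placeat mat pos → Spec_placeat mat pos (placeat mat pos)

-- ===== LEMMAS AND PROOFS =====

-- A's three rescans of candidate t say exactly "t is not in B's used set"
lemma checkRule_eq_not_used (mat : List (List Int)) (pos : Int × Int) (t : Int) :
    checkRule mat pos t = !(PySem.Set.contains (usedSet mat pos) t) := by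
  rw [Bool.eq_iff_iff]
  simp only [checkRule, usedSet, pvGet2, pvGet2B]
  split_ifs with h1 h2 h3 <;>
    simp_all [List.any_eq_true, List.mem_append, List.mem_map, List.mem_flatMap,
      PySem.Set.mem_ofList, beq_iff_eq]

-- A's while-loop is "some candidate in [t, 10) passes checkRule"
lemma placeLoopA_eq_any (mat : List (List Int)) (pos : Int × Int) (t : Int) :
    placeLoopA mat pos t = (PySem.List.pyRange t 10 1).any (fun s => checkRule mat pos s) := by
  rw [placeLoopA]
  split_ifs with hlt hc
  · rw [PySem.List.pyRange_one_cons hlt]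
    simp [hc]
  · rw [PySem.List.pyRange_one_cons hlt]
    simp [hc, placeLoopA_eq_any mat pos (t + 1)]
  · rw [PySem.List.pyRange_one_eq_nil (by omega)]
    simp
termination_by (10 - t).toNat
decreasing_by omega

-- ===== VERDICT (by name: the statement is the Claim_ definition above) =====
theorem placeat_spec : Claim_equal_placeat := by
  intro mat pos _ _
  show placeat mat pos = placeat_alt mat pos
  rw [placeat, placeat_alt, placeLoopA_eq_any]
  simp only [pvGet2, pvGet2B]
  split_ifs with hk
  · rw [PySem.List.pyRange_one_eq_nil (by omega)]; rfl
  · exact congrArg _ (funext (fun s => checkRule_eq_not_used mat pos s))
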